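-- pv_equiv track=rewrite | github.com/pulp-platform/picobello | experiments/dma_multicast_v2/model.py | nearest_divisors
-- ===== SOURCE A (Python) =====
-- from math import isqrt, sqrt, log2
--
-- def nearest_divisors(divisor, dividend):
--     from bisect import bisect_left
--
--     # 1) Enumerate all positive divisors of dividend
--     divs = set()
--     r = int(isqrt(int(dividend)))
--     for d in range(1, r + 1):
--         if dividend % d == 0:        # d divides dividend
--             divs.add(d)              # add the small factor
--             divs.add(dividend // d)  # add the paired large factor
--     divs = sorted(divs)              # sort them ascending
--
--     # 2) Binary search to locate where x would be inserted
--     i = bisect_left(divs, divisor)  # first index with divs[i] >= divisor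
--
--     # 3) Pick neighbors around divisor
--     lower = divs[i - 1] if i > 0 and divs[i - 1] <= divisor else None
--     upper = divs[i] if i < len(divs) else None
--     return lower, upper
-- ===== SOURCE B (Python) =====
-- from math import isqrt
--
-- def nearest_divisors(divisor, dividend):
--     # Single pass: keep the best neighbours directly instead of sort + bisect.
--     lower = None
--     upper = None
--     r = int(isqrt(int(dividend)))
--     for d in range(1, r + 1):
--         if dividend % d == 0:
--             for c in (d, dividend // d):
--                 if c < divisor:
--                     if lower is None or c > lower:
--                         lower = c
--                 else:
--                     if upper is None or c < upper:
--                         upper = c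
--     return lower, upper
-- ===== Notes on version B (the rewrite author's own statement) =====
-- stated objective: simpler
-- what changed: Replaced the collect-into-a-set, sort and bisect pipeline by a single pass over the trial divisors that maintains the running best neighbour below (max of candidates < divisor) and at-or-above (min of candidates >= divisor), so no set, no sort and no binary search are needed.
import Mathlib
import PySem

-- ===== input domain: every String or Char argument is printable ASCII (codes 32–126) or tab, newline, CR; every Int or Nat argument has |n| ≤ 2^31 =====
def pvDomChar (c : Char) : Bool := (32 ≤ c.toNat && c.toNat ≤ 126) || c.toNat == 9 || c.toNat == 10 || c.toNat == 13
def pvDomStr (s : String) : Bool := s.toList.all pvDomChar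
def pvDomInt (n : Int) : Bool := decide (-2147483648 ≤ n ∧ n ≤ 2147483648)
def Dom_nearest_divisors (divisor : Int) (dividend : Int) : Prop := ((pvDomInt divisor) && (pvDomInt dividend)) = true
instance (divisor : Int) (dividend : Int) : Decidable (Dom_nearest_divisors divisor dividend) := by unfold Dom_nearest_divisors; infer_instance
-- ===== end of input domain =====

-- B replaces A's set + sort + bisect by one pass that keeps the best neighbour below and at-or-above (simpler; same return value).

-- ===== PORT A =====
-- isqrt(int(dividend)) ported as Nat.sqrt on dividend.toNat: exact for dividend ≥ 0 (Pre_); Python raises ValueError for negative dividend.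
def nearest_divisors (divisor : Int) (dividend : Int) : Option Int × Option Int :=
  let r : Int := ((Int.toNat dividend).sqrt : Int)
  let divs : PySem.Set Int :=
    (PySem.List.pyRange 1 (r + 1) 1).foldl
      (fun s d =>
        if PySem.Int.mod dividend d = 0 then
          PySem.Set.add (PySem.Set.add s d) (PySem.Int.floordiv dividend d)
        else s)
      PySem.Set.empty
  let L : List Int := PySem.List.sorted divs (fun x => x) false
  let i : Nat := PySem.List.bisectLeft L divisor
  let lower : Option Int :=
    if 0 < i then
      match L[i - 1]? with      -- index valid: 0 < i ≤ L.length
      | some v => if v ≤ divisor then some v else none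
      | none => none
    else none
  let upper : Option Int := if i < L.length then L[i]? else none
  (lower, upper)

-- ===== PORT B =====
-- loop body of Source B: fold one candidate c into the running (lower, upper)
def nd_step (divisor : Int) (st : Option Int × Option Int) (c : Int) : Option Int × Option Int :=
  if c < divisor then
    (match st.1 with
     | none => some c
     | some l => if l < c then some c else some l, st.2)
  else
    (st.1, match st.2 with
     | none => some c
     | some u => if c < u then some c else some u)

def nearest_divisors_alt (divisor : Int) (dividend : Int) : Option Int × Option Int :=
  let r : Int := ((Int.toNat dividend).sqrt : Int)
  (PySem.List.pyRange 1 (r + 1) 1).foldl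
    (fun st d =>
      if PySem.Int.mod dividend d = 0 then
        [d, PySem.Int.floordiv dividend d].foldl (nd_step divisor) st
      else st)
    (none, none)

-- ===== PRECONDITION & SPEC =====
-- A raises ValueError (math.isqrt of a negative number) when dividend < 0; B raises there too.
def Pre_nearest_divisors (divisor : Int) (dividend : Int) : Prop := 0 ≤ dividend
instance (divisor : Int) (dividend : Int) : Decidable (Pre_nearest_divisors divisor dividend) := by unfold Pre_nearest_divisors; infer_instance
def pvWitness_nearest_divisors : Int × Int := (6, 36)

def Spec_nearest_divisors (divisor : Int) (dividend : Int) (out : Option Int × Option Int) : Prop := out = nearest_divisors_alt divisor dividend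
instance (divisor : Int) (dividend : Int) (out : Option Int × Option Int) : Decidable (Spec_nearest_divisors divisor dividend out) := by unfold Spec_nearest_divisors; infer_instance

-- ===== CLAIM (what is proved, stated in full; the proofs are below) =====
def Claim_equal_nearest_divisors : Prop := ∀ (divisor : Int) (dividend : Int), Dom_nearest_divisors divisor dividend → Pre_nearest_divisors divisor dividend → Spec_nearest_divisors divisor dividend (nearest_divisors divisor dividend)

-- ===== LEMMAS AND PROOFS =====

-- the candidate values both loops generate, in generation order
def ndCands (dividend : Int) : List Int :=
  (PySem.List.pyRange 1 (((Int.toNat dividend).sqrt : Int) + 1) 1).flatMap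
    (fun d => if PySem.Int.mod dividend d = 0 then [d, PySem.Int.floordiv dividend d] else [])

-- running max / min of an optional accumulator (the two halves of nd_step)
def omax : Option Int → Int → Option Int
  | none, c => some c
  | some l, c => if l < c then some c else some l

def omin : Option Int → Int → Option Int
  | none, c => some c
  | some u, c => if c < u then some c else some u

theorem nd_step_eq (x : Int) (st : Option Int × Option Int) (c : Int) :
    nd_step x st c = if c < x then (omax st.1 c, st.2) else (st.1, omin st.2 c) := by
  obtain ⟨a, b⟩ := st
  unfold nd_step
  split
  · cases a <;> rfl
  · cases b <;> rfl

theorem foldl_flatMap' {α β σ : Type} (g : α → List β) (f : σ → β → σ) :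
    ∀ (l : List α) (s : σ), (l.flatMap g).foldl f s = l.foldl (fun s a => (g a).foldl f s) s := by
  intro l
  induction l with
  | nil => intro s; rfl
  | cons a t ih => intro s; simp [List.flatMap_cons, List.foldl_append, ih]

theorem altB (x n : Int) :
    nearest_divisors_alt x n = (ndCands n).foldl (nd_step x) (none, none) := by
  unfold nearest_divisors_alt ndCands
  rw [foldl_flatMap']
  apply PySem.List.foldl_congr_mem
  intro acc d _
  split <;> rfl

theorem setA (x n : Int) :
    nearest_divisors x n =
      (let L : List Int := PySem.List.sorted (PySem.Set.ofList (ndCands n)) (fun x => x) false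
       let i : Nat := PySem.List.bisectLeft L x
       ((if 0 < i then
           match L[i - 1]? with
           | some v => if v ≤ x then some v else none
           | none => none
         else none),
        (if i < L.length then L[i]? else none))) := by
  unfold nearest_divisors ndCands
  rw [PySem.Set.ofList_eq_foldl, foldl_flatMap']
  have h : (fun (s : PySem.Set Int) (d : Int) =>
      (if PySem.Int.mod n d = 0 then [d, PySem.Int.floordiv n d] else []).foldl PySem.Set.add s)
      = (fun (s : PySem.Set Int) (d : Int) =>
      if PySem.Int.mod n d = 0 then PySem.Set.add (PySem.Set.add s d) (PySem.Int.floordiv n d) else s) := by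
    funext s d; split <;> rfl
  rw [h]
  rfl

theorem omax_some (a c : Int) : omax (some a) c = some (max a c) := by
  simp only [omax]
  split
  · rw [max_eq_right (by omega)]
  · rw [max_eq_left (by omega)]

theorem omin_some (a c : Int) : omin (some a) c = some (min a c) := by
  simp only [omin]
  split
  · rw [min_eq_right (by omega)]
  · rw [min_eq_left (by omega)]

theorem foldl_omax_max (t : List Int) : ∀ a : Int, t.foldl omax (some a) = some (t.foldl max a) := by
  induction t with
  | nil => intro a; rfl
  | cons c t ih => intro a; rw [List.foldl_cons, omax_some, List.foldl_cons, ih]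

theorem foldl_omin_min (t : List Int) : ∀ a : Int, t.foldl omin (some a) = some (t.foldl min a) := by
  induction t with
  | nil => intro a; rfl
  | cons c t ih => intro a; rw [List.foldl_cons, omin_some, List.foldl_cons, ih]

theorem Fmax_spec (a : Int) (t : List Int) :
    ∃ M, (a :: t).foldl omax none = some M ∧ M ∈ a :: t ∧ ∀ y ∈ a :: t, y ≤ M := by
  refine ⟨t.foldl max a, ?_, ?_, ?_⟩
  · rw [List.foldl_cons]; exact foldl_omax_max t a
  · rcases PySem.List.foldl_max_mem t a with h | h
    · rw [h]; exact List.mem_cons_self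
    · exact List.mem_cons_of_mem _ h
  · intro y hy
    rcases List.mem_cons.mp hy with rfl | hy
    · exact (PySem.List.le_foldl_max t y).1
    · exact (PySem.List.le_foldl_max t a).2 y hy

theorem Fmin_spec (a : Int) (t : List Int) :
    ∃ M, (a :: t).foldl omin none = some M ∧ M ∈ a :: t ∧ ∀ y ∈ a :: t, M ≤ y := by
  refine ⟨t.foldl min a, ?_, ?_, ?_⟩
  · rw [List.foldl_cons]; exact foldl_omin_min t a
  · rcases PySem.List.foldl_min_mem t a with h | h
    · rw [h]; exact List.mem_cons_self
    · exact List.mem_cons_of_mem _ h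
  · intro y hy
    rcases List.mem_cons.mp hy with rfl | hy
    · exact (PySem.List.foldl_min_le t y).1
    · exact (PySem.List.foldl_min_le t a).2 y hy

theorem Fmax_eq (l : List Int) (m : Int) (hm : m ∈ l) (hub : ∀ y ∈ l, y ≤ m) :
    l.foldl omax none = some m := by
  cases l with
  | nil => simp at hm
  | cons a t =>
    obtain ⟨M, e, mM, ub⟩ := Fmax_spec a t
    rw [e]
    exact congrArg some (le_antisymm (hub M mM) (ub m hm))

theorem Fmin_eq (l : List Int) (m : Int) (hm : m ∈ l) (hlb : ∀ y ∈ l, m ≤ y) :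
    l.foldl omin none = some m := by
  cases l with
  | nil => simp at hm
  | cons a t =>
    obtain ⟨M, e, mM, lb⟩ := Fmin_spec a t
    rw [e]
    exact congrArg some (le_antisymm (lb m hm) (hlb M mM))

theorem Fmax_congr (l₁ l₂ : List Int) (h : ∀ y, y ∈ l₁ ↔ y ∈ l₂) :
    l₁.foldl omax none = l₂.foldl omax none := by
  cases l₁ with
  | nil =>
    cases l₂ with
    | nil => rfl
    | cons b u => exact absurd ((h b).mpr List.mem_cons_self) (List.not_mem_nil)
  | cons a t =>
    cases l₂ with
    | nil => exact absurd ((h a).mp List.mem_cons_self) (List.not_mem_nil)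
    | cons b u =>
      obtain ⟨_, e1, m1, ub1⟩ := Fmax_spec a t
      rw [e1]
      exact (Fmax_eq _ _ ((h _).mp m1) (fun y hy => ub1 y ((h y).mpr hy))).symm

theorem Fmin_congr (l₁ l₂ : List Int) (h : ∀ y, y ∈ l₁ ↔ y ∈ l₂) :
    l₁.foldl omin none = l₂.foldl omin none := by
  cases l₁ with
  | nil =>
    cases l₂ with
    | nil => rfl
    | cons b u => exact absurd ((h b).mpr List.mem_cons_self) (List.not_mem_nil)
  | cons a t =>
    cases l₂ with
    | nil => exact absurd ((h a).mp List.mem_cons_self) (List.not_mem_nil)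
    | cons b u =>
      obtain ⟨_, e1, m1, lb1⟩ := Fmin_spec a t
      rw [e1]
      exact (Fmin_eq _ _ ((h _).mp m1) (fun y hy => lb1 y ((h y).mpr hy))).symm

theorem foldB (x : Int) (cs : List Int) : ∀ (lo up : Option Int),
    cs.foldl (nd_step x) (lo, up) =
      ((cs.filter (fun c => decide (c < x))).foldl omax lo,
       (cs.filter (fun c => !decide (c < x))).foldl omin up) := by
  induction cs with
  | nil => intro lo up; rfl
  | cons c t ih =>
    intro lo up
    rw [List.foldl_cons, nd_step_eq]
    by_cases h : c < x
    · rw [if_pos h, ih]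
      simp [h]
    · rw [if_neg h, ih]
      simp [h]

theorem extractA (L : List Int) (x : Int) (hs : L.Pairwise (· < ·)) :
    (let i := PySem.List.bisectLeft L x
     ((if 0 < i then
         match L[i - 1]? with
         | some v => if v ≤ x then some v else none
         | none => none
       else none),
      (if i < L.length then L[i]? else none)))
    = ((L.filter (fun c => decide (c < x))).foldl omax none,
       (L.filter (fun c => !decide (c < x))).foldl omin none) := by
  obtain ⟨hle, hlt, hge⟩ := PySem.List.bisectLeft_spec L x (hs.imp le_of_lt)
  set i := PySem.List.bisectLeft L x with hi
  have hmono : ∀ (p q : Nat) (hpq : p ≤ q) (hq : q < L.length), L[p]'(by omega) ≤ L[q] := by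
    intro p q hpq hq
    rcases Nat.lt_or_ge p q with h | h
    · exact le_of_lt ((List.pairwise_iff_getElem.mp hs) p q (by omega) hq h)
    · have : p = q := by omega
      subst this; exact le_refl _
  have hfilt1 : L.filter (fun c => decide (c < x)) = L.take i := by
    conv_lhs => rw [← List.take_append_drop i L]
    rw [List.filter_append]
    have h1 : (L.take i).filter (fun c => decide (c < x)) = L.take i := by
      apply List.filter_eq_self.mpr
      intro a ha
      obtain ⟨j, hj, e⟩ := List.mem_take_iff_getElem.mp ha
      subst e
      exact decide_eq_true (hlt j (by omega) (by omega))
    have h2 : (L.drop i).filter (fun c => decide (c < x)) = [] := by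
      apply List.filter_eq_nil_iff.mpr
      intro a ha
      obtain ⟨j, hj, e⟩ := List.mem_drop_iff_getElem.mp ha
      subst e
      simp only [decide_eq_true_eq]
      exact not_lt.mpr (hge (i + j) (by omega) (by omega))
    rw [h1, h2, List.append_nil]
  have hfilt2 : L.filter (fun c => !decide (c < x)) = L.drop i := by
    conv_lhs => rw [← List.take_append_drop i L]
    rw [List.filter_append]
    have h1 : (L.take i).filter (fun c => !decide (c < x)) = [] := by
      apply List.filter_eq_nil_iff.mpr
      intro a ha
      obtain ⟨j, hj, e⟩ := List.mem_take_iff_getElem.mp ha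
      subst e
      simp only [Bool.not_eq_true', decide_eq_false_iff_not, not_not]
      exact hlt j (by omega) (by omega)
    have h2 : (L.drop i).filter (fun c => !decide (c < x)) = L.drop i := by
      apply List.filter_eq_self.mpr
      intro a ha
      obtain ⟨j, hj, e⟩ := List.mem_drop_iff_getElem.mp ha
      subst e
      simp only [Bool.not_eq_true', decide_eq_false_iff_not]
      exact not_lt.mpr (hge (i + j) (by omega) (by omega))
    rw [h1, h2, List.nil_append]
  rw [hfilt1, hfilt2]
  refine Prod.ext ?_ ?_
  · -- lower component
    rcases Nat.eq_zero_or_pos i with h0 | h0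
    · simp [h0]
    · have hi1 : i - 1 < L.length := by omega
      have hget : L[i - 1]? = some (L[i - 1]) := List.getElem?_eq_getElem hi1
      have hvx : L[i - 1] < x := hlt (i - 1) hi1 (by omega)
      have hmax : (L.take i).foldl omax none = some (L[i - 1]) := by
        apply Fmax_eq
        · exact List.mem_take_iff_getElem.mpr ⟨i - 1, by omega, rfl⟩
        · intro y hy
          obtain ⟨j, hj, e⟩ := List.mem_take_iff_getElem.mp hy
          subst e
          exact hmono j (i - 1) (by omega) hi1
      rw [hmax]
      simp only [h0, if_pos, hget]
      rw [if_pos (le_of_lt hvx)]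
  · -- upper component
    rcases Nat.lt_or_ge i L.length with hl | hl
    · have hget : L[i]? = some (L[i]) := List.getElem?_eq_getElem hl
      have hmin : (L.drop i).foldl omin none = some (L[i]) := by
        apply Fmin_eq
        · exact List.mem_drop_iff_getElem.mpr ⟨0, by omega, by simp⟩
        · intro y hy
          obtain ⟨j, hj, e⟩ := List.mem_drop_iff_getElem.mp hy
          subst e
          exact hmono i (i + j) (by omega) (by omega)
      dsimp only
      rw [hmin, if_pos hl, hget]
    · dsimp only
      rw [List.drop_of_length_le hl, if_neg (by omega)]
      rfl

-- ===== VERDICT (by name: the statement is the Claim_ definition above) =====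
theorem nearest_divisors_spec : Claim_equal_nearest_divisors := by
  intro x n _ _
  unfold Spec_nearest_divisors
  rw [altB, setA, foldB]
  set L : List Int := PySem.List.sorted (PySem.Set.ofList (ndCands n)) (fun x => x) false with hL
  have hs : L.Pairwise (· < ·) := PySem.List.sorted_ofList_pairwise_lt (ndCands n)
  rw [extractA L x hs]
  have hmem : ∀ y, y ∈ L ↔ y ∈ ndCands n := by
    intro y
    rw [hL, PySem.List.mem_sorted, PySem.Set.mem_ofList]
  refine Prod.ext ?_ ?_
  · exact Fmax_congr _ _ (fun y => by simp only [List.mem_filter, hmem])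
  · exact Fmin_congr _ _ (fun y => by simp only [List.mem_filter, hmem])
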